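-- pv_equiv track=rewrite | github.com/AmenoHabikiri/ClassicDSA | GeeksForGeeks/Array/#maxSumOnlyRotation.py | maxSumOnlyRotation
-- ===== SOURCE A (Python) =====
-- def arrayRotate2(A,d):#O(d)
--     n=len(A)
--     k=d%n
--     for i in range(k):
--         a=A[0]
--         A.pop(0)
--         A.append(a)
--     return A
--
-- def maxSumOnlyRotation(A):
--     sum1=0
--     li=A
--     k=0
--     n=len(A)
--     for i in range(n):
--         sum1=sum1+i*A[i]
--         k=k+A[i]
--     sum=sum1
--     pivot=-1
--     for i in range(1,n):
--         sum1=sum1-A[n-i]*(n)+k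
--         if sum1>sum:
--             sum=sum1
--             pivot=i
--     return arrayRotate2(A,n-pivot)
-- ===== SOURCE B (Python) =====
-- def arrayRotate2(A, d):
--     n = len(A)
--     k = d % n
--     for i in range(k):
--         a = A[0]
--         A.pop(0)
--         A.append(a)
--     return A
--
--
-- def maxSumOnlyRotation(A):
--     n = len(A)
--
--     def val(i):
--         return sum(((m + i) % n) * A[m] for m in range(n))
--
--     best = val(0)
--     pivot = -1
--     for i in range(1, n):
--         v = val(i)
--         if v > best:
--             best = v
--             pivot = i
--     return arrayRotate2(A, n - pivot)
-- ===== Notes on version B (the rewrite author's own statement) =====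
-- stated objective: simpler
-- what changed: Replaces the O(n) rolling recurrence (sum1 = sum1 - A[n-i]*n + k with two running accumulators) by a direct per-rotation weighted sum val(i) = sum(((m+i)%n)*A[m]), keeping the pivot selection and the arrayRotate2 helper; no running state beyond best/pivot.
import Mathlib
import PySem

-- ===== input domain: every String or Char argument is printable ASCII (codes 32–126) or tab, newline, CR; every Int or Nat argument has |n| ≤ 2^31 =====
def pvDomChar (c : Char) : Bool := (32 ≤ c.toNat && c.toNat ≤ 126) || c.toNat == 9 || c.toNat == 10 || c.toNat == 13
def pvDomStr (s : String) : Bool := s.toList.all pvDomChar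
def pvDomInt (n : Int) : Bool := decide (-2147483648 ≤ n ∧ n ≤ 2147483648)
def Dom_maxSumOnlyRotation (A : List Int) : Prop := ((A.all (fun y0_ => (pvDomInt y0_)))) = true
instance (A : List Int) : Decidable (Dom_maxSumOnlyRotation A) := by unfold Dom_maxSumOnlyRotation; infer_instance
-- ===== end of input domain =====

-- B replaces A's rolling recurrence by a direct weighted sum per rotation (simpler, no
-- running accumulators); return-value equivalence only: both Pythons rotate A in place.

-- ===== PORT A =====
-- shared helper arrayRotate2 (both Python files use the identical helper):
-- one left-rotation step a=A[0]; A.pop(0); A.append(a)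
def pvRotStep (A : List Int) : List Int :=
  match A with
  | [] => []
  | x :: xs => xs ++ [x]

def pvRotLoop : Nat → List Int → List Int
  | 0, A => A
  | k + 1, A => pvRotLoop k (pvRotStep A)

-- Python raises ZeroDivisionError at d % n when A = []; that input is excluded by Pre_
def arrayRotate2 (A : List Int) (d : Int) : List Int :=
  if A.length = 0 then []
  else pvRotLoop (PySem.Int.mod d A.length).toNat A

def maxSumOnlyRotation (A : List Int) : List Int :=
  let n := A.length
  -- for i in range(n): sum1 += i*A[i]; k += A[i]
  let p := (List.range n).foldl
    (fun (p : Int × Int) (i : Nat) => (p.1 + (i : Int) * A.getD i 0, p.2 + A.getD i 0)) (0, 0)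
  -- state (sum1, sum, pivot); for i in range(1, n)
  let st := (List.range (n - 1)).foldl
    (fun (st : Int × Int × Int) j =>
      let i := j + 1
      let s1 := st.1 - A.getD (n - i) 0 * (n : Int) + p.2
      if s1 > st.2.1 then (s1, s1, (i : Int)) else (s1, st.2.1, st.2.2))
    (p.1, p.1, -1)
  arrayRotate2 A ((n : Int) - st.2.2)

-- ===== PORT B =====
-- val(i) = sum(((m + i) % n) * A[m] for m in range(n))
def pvValB (A : List Int) (n : Nat) (i : Nat) : Int :=
  (List.range n).foldl (fun acc m => acc + (((m + i) % n : Nat) : Int) * A.getD m 0) 0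

def maxSumOnlyRotation_alt (A : List Int) : List Int :=
  let n := A.length
  let bp := (List.range (n - 1)).foldl
    (fun (bp : Int × Int) j =>
      let i := j + 1
      let v := pvValB A n i
      if v > bp.1 then (v, (i : Int)) else bp)
    (pvValB A n 0, -1)
  arrayRotate2 A ((n : Int) - bp.2)

-- ===== PRECONDITION & SPEC =====
-- Pre_ excludes only the empty list, on which both Pythons raise ZeroDivisionError in arrayRotate2
def Pre_maxSumOnlyRotation (A : List Int) : Prop := A ≠ []
instance (A : List Int) : Decidable (Pre_maxSumOnlyRotation A) := by unfold Pre_maxSumOnlyRotation; infer_instance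
def pvWitness_maxSumOnlyRotation : List Int := [1, 2, 3]

def Spec_maxSumOnlyRotation (A : List Int) (out : List Int) : Prop := out = maxSumOnlyRotation_alt A
instance (A : List Int) (out : List Int) : Decidable (Spec_maxSumOnlyRotation A out) := by unfold Spec_maxSumOnlyRotation; infer_instance

-- ===== CLAIM (what is proved, stated in full; the proofs are below) =====
def Claim_equal_maxSumOnlyRotation : Prop := ∀ (A : List Int), Dom_maxSumOnlyRotation A → Pre_maxSumOnlyRotation A → Spec_maxSumOnlyRotation A (maxSumOnlyRotation A)

-- ===== LEMMAS AND PROOFS =====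

theorem pv_foldl_add_sum (g : Nat → Int) (a : Int) (n : Nat) :
    (List.range n).foldl (fun acc m => acc + g m) a = a + ∑ m ∈ Finset.range n, g m := by
  induction n with
  | zero => simp
  | succ k ih =>
      rw [List.range_succ, List.foldl_append, ih, Finset.sum_range_succ]
      simp [add_assoc]

theorem pv_foldl_pair_sum (g h : Nat → Int) (a b : Int) (n : Nat) :
    (List.range n).foldl (fun (p : Int × Int) (i : Nat) => (p.1 + g i, p.2 + h i)) (a, b)
      = (a + ∑ i ∈ Finset.range n, g i, b + ∑ i ∈ Finset.range n, h i) := by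
  induction n with
  | zero => simp
  | succ k ih =>
      rw [List.range_succ, List.foldl_append, ih, Finset.sum_range_succ, Finset.sum_range_succ]
      simp [add_assoc]

theorem pvValB_eq_sum (A : List Int) (n i : Nat) :
    pvValB A n i = ∑ m ∈ Finset.range n, (((m + i) % n : Nat) : Int) * A.getD m 0 := by
  have := pv_foldl_add_sum (fun m => (((m + i) % n : Nat) : Int) * A.getD m 0) 0 n
  simpa [pvValB] using this

theorem pv_mod_succ_of_lt (x n : Nat) (h : x % n + 1 < n) : (x + 1) % n = x % n + 1 := by
  conv_lhs => rw [← Nat.div_add_mod x n]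
  rw [Nat.add_assoc, Nat.mul_add_mod]
  exact Nat.mod_eq_of_lt h

theorem pvValB_succ (A : List Int) (j : Nat) (h1 : j + 1 < A.length) :
    pvValB A A.length (j + 1)
      = pvValB A A.length j - A.getD (A.length - (j + 1)) 0 * (A.length : Int)
        + ∑ m ∈ Finset.range A.length, A.getD m 0 := by
  set n := A.length with hn
  set f : Nat → Int := fun m => A.getD m 0 with hf
  have hmem : n - (j + 1) ∈ Finset.range n := by
    refine Finset.mem_range.mpr ?_
    omega
  have key : ∑ m ∈ Finset.range n, (((m + (j + 1)) % n : Nat) : Int) * f m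
        + (n : Int) * f (n - (j + 1))
      = ∑ m ∈ Finset.range n, ((((m + j) % n : Nat) : Int) * f m + f m) := by
    have hsingle : ∑ m ∈ Finset.range n,
        (if m = n - (j + 1) then (n : Int) * f (n - (j + 1)) else 0)
        = (n : Int) * f (n - (j + 1)) := by
      rw [Finset.sum_ite_eq' (Finset.range n) (n - (j + 1))
        (fun _ => (n : Int) * f (n - (j + 1)))]
      simp [hmem]
    rw [← hsingle, ← Finset.sum_add_distrib]
    refine Finset.sum_congr rfl ?_
    intro m hm
    have hmlt : m < n := Finset.mem_range.mp hm
    by_cases hcase : m = n - (j + 1)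
    · subst hcase
      have h2 : (n - (j + 1)) + (j + 1) = n := by omega
      have h3 : (n - (j + 1)) + j = n - 1 := by omega
      rw [h2, h3, Nat.mod_self, Nat.mod_eq_of_lt (by omega : n - 1 < n)]
      have : ((n - 1 : Nat) : Int) * f (n - (j + 1)) + f (n - (j + 1))
          = (n : Int) * f (n - (j + 1)) := by
        have hcast : ((n - 1 : Nat) : Int) = (n : Int) - 1 := by
          omega
        rw [hcast]; ring
      simp only [Nat.cast_zero, zero_mul, zero_add, if_pos]
      simpa using this.symm
    · have hne : (m + j) % n ≠ n - 1 := by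
        intro habs
        by_cases hlt2 : m + j < n
        · rw [Nat.mod_eq_of_lt hlt2] at habs
          omega
        · have h2n : m + j - n < n := by omega
          have heq2 : (m + j) % n = m + j - n := by
            rw [Nat.mod_eq_sub_mod (by omega), Nat.mod_eq_of_lt h2n]
          omega
      have hmm := Nat.mod_lt (m + j) (show 0 < n by omega)
      have hlt : (m + j) % n + 1 < n := by omega
      have hstep : (m + j + 1) % n = (m + j) % n + 1 := pv_mod_succ_of_lt (m + j) n hlt
      rw [if_neg hcase, show m + (j + 1) = m + j + 1 from by omega, hstep]
      push_cast
      ring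
  have hsplit : ∑ m ∈ Finset.range n, ((((m + j) % n : Nat) : Int) * f m + f m)
      = (∑ m ∈ Finset.range n, (((m + j) % n : Nat) : Int) * f m)
        + ∑ m ∈ Finset.range n, f m := Finset.sum_add_distrib
  rw [pvValB_eq_sum, pvValB_eq_sum]
  have := key
  rw [hsplit] at this
  have hff : (∑ m ∈ Finset.range n, A.getD m 0) = ∑ m ∈ Finset.range n, f m := rfl
  rw [hff]
  linarith [this]

theorem pv_loop_inv (A : List Int) (hA : A ≠ []) (r : Nat) (hr : r ≤ A.length - 1)
    (b pv : Int) :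
    (List.range r).foldl
      (fun (st : Int × Int × Int) j =>
        let i := j + 1
        let s1 := st.1 - A.getD (A.length - i) 0 * (A.length : Int)
          + ∑ m ∈ Finset.range A.length, A.getD m 0
        if s1 > st.2.1 then (s1, s1, (i : Int)) else (s1, st.2.1, st.2.2))
      (pvValB A A.length 0, b, pv)
    = (pvValB A A.length r,
       ((List.range r).foldl
          (fun (bp : Int × Int) j =>
            let i := j + 1
            let v := pvValB A A.length i
            if v > bp.1 then (v, (i : Int)) else bp)
          (b, pv)).1,
       ((List.range r).foldl
          (fun (bp : Int × Int) j =>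
            let i := j + 1
            let v := pvValB A A.length i
            if v > bp.1 then (v, (i : Int)) else bp)
          (b, pv)).2) := by
  have hn : 0 < A.length := List.length_pos_iff.mpr hA
  induction r with
  | zero => simp
  | succ k ih =>
      have hk : k ≤ A.length - 1 := by omega
      have hk1 : k + 1 < A.length := by omega
      rw [List.range_succ, List.foldl_append, List.foldl_append, ih hk]
      simp only [List.foldl_cons, List.foldl_nil]
      rw [← pvValB_succ A k hk1]
      split_ifs <;> rfl

theorem maxSumOnlyRotation_eq (A : List Int) (hA : A ≠ []) :
    maxSumOnlyRotation A = maxSumOnlyRotation_alt A := by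
  have hn : 0 < A.length := List.length_pos_iff.mpr hA
  simp only [maxSumOnlyRotation, maxSumOnlyRotation_alt]
  rw [pv_foldl_pair_sum (fun i => (i : Int) * A.getD i 0) (fun i => A.getD i 0) 0 0]
  have h0 : pvValB A A.length 0
      = 0 + ∑ m ∈ Finset.range A.length, ((m : Int)) * A.getD m 0 := by
    rw [pvValB_eq_sum, zero_add]
    refine Finset.sum_congr rfl ?_
    intro m hm
    have : (m + 0) % A.length = m := by
      rw [Nat.add_zero]
      exact Nat.mod_eq_of_lt (Finset.mem_range.mp hm)
    rw [this]
  simp only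
  rw [← h0, zero_add, pv_loop_inv A hA (A.length - 1) (le_refl _) (pvValB A A.length 0) (-1)]

theorem maxSumOnlyRotation_spec : Claim_equal_maxSumOnlyRotation := by
  intro A _ hpre
  unfold Spec_maxSumOnlyRotation
  exact maxSumOnlyRotation_eq A hpre
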